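-- pv_equiv track=rewrite | github.com/yashpandey474/Competitive-Coding | CodeForces/gift_carpet.py | checkVika
-- ===== SOURCE A (Python) =====
-- def checkVika(arr):
--     rows, cols = len(arr), len(arr[0])
--     map_vika = {i: set() for i in "vika"}
--
--     for i in range(cols):
--         for j in range(rows):
--             if arr[j][i] in map_vika:
--                 map_vika[arr[j][i]].add(i)
--
--     for i in map_vika:
--         if len(map_vika[i]) == 0:
--             return "NO"
--
--     string = "vika"
--     n = 4
--     cache = {}
--     def dfs(index, column, prevMax):
--         if (index, column, prevMax) in cache:
--             return cache[(index, column, prevMax)]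
--
--         if index >= n:
--             return True
--
--         if column >= cols:
--             return False
--
--         res = dfs(index, column + 1, prevMax)
--
--         if column in map_vika[string[index]] and column > prevMax:
--             res = dfs(index + 1, column + 1, column)
--
--         cache[(index, column, prevMax)] = res
--         return res
--
--     res = dfs(0, 0, -1)
--
--     return ("YES" if res else "NO")
-- ===== SOURCE B (Python) =====
-- def checkVika(arr):
--     target = "vika"
--     idx = 0
--     for c in range(len(arr[0])):
--         if idx < 4 and any(row[c] == target[idx] for row in arr):
--             idx += 1
--     return "YES" if idx == 4 else "NO"
-- ===== Notes on version B (the rewrite author's own statement) =====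
-- stated objective: alternative
-- what changed: Replaces A's per-letter column-set dictionary plus memoized three-argument DFS over (index, column, prevMax) states with a single greedy left-to-right pass over the columns that advances a pointer into 'vika' whenever the current column contains the needed letter.
import Mathlib
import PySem

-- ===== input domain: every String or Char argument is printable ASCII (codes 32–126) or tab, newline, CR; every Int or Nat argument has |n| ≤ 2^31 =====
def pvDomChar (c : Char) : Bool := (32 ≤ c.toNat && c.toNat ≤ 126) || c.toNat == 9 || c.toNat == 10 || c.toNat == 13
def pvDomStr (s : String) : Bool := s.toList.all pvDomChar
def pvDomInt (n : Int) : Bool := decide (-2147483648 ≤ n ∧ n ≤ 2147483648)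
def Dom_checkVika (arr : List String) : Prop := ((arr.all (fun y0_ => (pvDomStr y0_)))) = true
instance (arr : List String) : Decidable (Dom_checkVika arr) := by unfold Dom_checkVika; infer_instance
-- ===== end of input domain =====

-- B replaces A's column-set dictionary + memoized three-argument DFS by a single greedy
-- left-to-right pass over the columns (objective: alternative — a genuinely different, simpler algorithm).

-- ===== PORT A =====
-- memoized dfs of A, with the cache dict threaded through explicitly; recursion is on a
-- structural Nat fuel that always satisfies (cols - column).toNat ≤ fuel, so the fuel-0
-- branch (placed after the 'column >= cols' return, which fires first) is never reached
def dfsA (mv : PySem.Dict Char (PySem.Set Int)) (cols : Int) :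
    Nat → Int → Int → Int → PySem.Dict (Int × Int × Int) Bool →
    Bool × PySem.Dict (Int × Int × Int) Bool
  | fuel, index, column, prevMax, cache =>
    match cache.get? (index, column, prevMax) with
    | some b => (b, cache)
    | none =>
      if index ≥ 4 then (true, cache)
      else if cols ≤ column then (false, cache)
      else match fuel with
        | 0 => (false, cache)   -- unreachable: here (cols - column).toNat ≥ 1
        | n + 1 =>
          let r1 := dfsA mv cols n index (column + 1) prevMax cache
          -- 'column in map_vika[string[index]] and column > prevMax'; string[index] is in range
          -- (0 ≤ index < 4 here) and the key is always present, so the getD defaults never bite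
          let r2 := if PySem.Set.contains (mv.getD ((PySem.Str.pyGet? "vika" index).getD ' ') PySem.Set.empty) column
                       && decide (prevMax < column)
            then dfsA mv cols n (index + 1) (column + 1) column r1.2
            else r1
          (r2.1, r2.2.insert (index, column, prevMax) r2.1)

def checkVika (arr : List String) : String :=
  let rows : Int := PySem.List.len arr
  -- arr[0]: IndexError on empty arr is excluded by Pre_ (the getD "" never bites there)
  let cols : Int := PySem.Str.len ((PySem.List.pyGet? arr 0).getD "")
  let mv0 : PySem.Dict Char (PySem.Set Int) :=
    ("vika".toList).foldl (fun d ch => d.insert ch PySem.Set.empty) PySem.Dict.empty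
  let mv : PySem.Dict Char (PySem.Set Int) :=
    (PySem.List.pyRange 0 cols 1).foldl (fun d i =>
      (PySem.List.pyRange 0 rows 1).foldl (fun d j =>
        -- arr[j][i]: under Pre_ both indexings are in range, the defaults never bite
        match PySem.Str.pyGet? (PySem.List.pyGetD arr j "") i with
        | some ch => if d.contains ch then d.modify ch PySem.Set.empty (fun s => PySem.Set.add s i) else d
        | none => d) d) mv0
  if mv.items.any (fun p => PySem.Set.len p.2 == 0) then "NO"
  else if (dfsA mv cols cols.toNat 0 0 (-1) PySem.Dict.empty).1 then "YES" else "NO"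

-- ===== PORT B =====
def checkVika_alt (arr : List String) : String :=
  let cols : Int := PySem.Str.len ((PySem.List.pyGet? arr 0).getD "")
  let idx : Int := (PySem.List.pyRange 0 cols 1).foldl
    (fun idx c =>
      if decide (idx < 4) && arr.any (fun row => PySem.Str.pyGet? row c == PySem.Str.pyGet? "vika" idx)
      then idx + 1 else idx) 0
  if idx == 4 then "YES" else "NO"

-- ===== PRECONDITION & SPEC =====
-- Pre_ excludes exactly the inputs on which Python A raises IndexError: the empty list
-- (arr[0]) and ragged grids with a row shorter than the first row (arr[j][i]).
def Pre_checkVika (arr : List String) : Prop :=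
  arr ≠ [] ∧ ∀ s ∈ arr, PySem.Str.len (arr.headD "") ≤ PySem.Str.len s
instance (arr : List String) : Decidable (Pre_checkVika arr) := by unfold Pre_checkVika; infer_instance
def pvWitness_checkVika : List String := ["vi", "ka"]
def Spec_checkVika (arr : List String) (out : String) : Prop := out = checkVika_alt arr
instance (arr : List String) (out : String) : Decidable (Spec_checkVika arr out) := by unfold Spec_checkVika; infer_instance

-- ===== CLAIM (what is proved, stated in full; the proofs are below) =====
def Claim_equal_checkVika : Prop := ∀ (arr : List String), Dom_checkVika arr → Pre_checkVika arr → Spec_checkVika arr (checkVika arr)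

-- ===== LEMMAS AND PROOFS =====

-- proof-side names for the pieces of the two ports
def colsOf (arr : List String) : Int := PySem.Str.len ((PySem.List.pyGet? arr 0).getD "")

def vch (i : Int) : Char := (PySem.Str.pyGet? "vika" i).getD ' '

def vikaL : List Char := ['v', 'i', 'k', 'a']

def hasCol (arr : List String) (c : Int) (ch : Char) : Bool :=
  arr.any (fun row => PySem.Str.pyGet? row c == some ch)

def innerStep (i : Int) (d : PySem.Dict Char (PySem.Set Int)) (row : String) :
    PySem.Dict Char (PySem.Set Int) :=
  match PySem.Str.pyGet? row i with
  | some ch => if d.contains ch then d.modify ch PySem.Set.empty (fun s => PySem.Set.add s i) else d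
  | none => d

def outerStep (arr : List String) (d : PySem.Dict Char (PySem.Set Int)) (i : Int) :
    PySem.Dict Char (PySem.Set Int) :=
  (PySem.List.pyRange 0 (PySem.List.len arr) 1).foldl (fun d j =>
    match PySem.Str.pyGet? (PySem.List.pyGetD arr j "") i with
    | some ch => if d.contains ch then d.modify ch PySem.Set.empty (fun s => PySem.Set.add s i) else d
    | none => d) d

def mv0D : PySem.Dict Char (PySem.Set Int) :=
  ("vika".toList).foldl (fun d ch => d.insert ch PySem.Set.empty) PySem.Dict.empty

def mvOf (arr : List String) : PySem.Dict Char (PySem.Set Int) :=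
  (PySem.List.pyRange 0 (colsOf arr) 1).foldl (outerStep arr) mv0D

def stepB (arr : List String) (idx c : Int) : Int :=
  if decide (idx < 4) && arr.any (fun row => PySem.Str.pyGet? row c == PySem.Str.pyGet? "vika" idx)
  then idx + 1 else idx

-- the greedy recursion A's memoized dfs computes (fuel = number of remaining columns)
def gg (arr : List String) : Nat → Int → Int → Bool
  | 0, index, _ => decide (index ≥ 4)
  | n + 1, index, column =>
    if index ≥ 4 then true
    else if hasCol arr column (vch index) then gg arr n (index + 1) (column + 1)
    else gg arr n index (column + 1)

-- every cache entry of A's dfs stores the gg-value of its state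
def GoodC (arr : List String) (cols : Int) (cache : PySem.Dict (Int × Int × Int) Bool) : Prop :=
  ∀ i c p b, cache.get? (i, c, p) = some b →
    0 ≤ c ∧ p < c ∧ b = gg arr (cols - c).toNat i c

theorem checkVika_eq (arr : List String) :
    checkVika arr =
      if (mvOf arr).items.any (fun p => PySem.Set.len p.2 == 0) then "NO"
      else if (dfsA (mvOf arr) (colsOf arr) (colsOf arr).toNat 0 0 (-1) PySem.Dict.empty).1
        then "YES" else "NO" := rfl

theorem alt_eq (arr : List String) :
    checkVika_alt arr =
      if ((PySem.List.pyRange 0 (colsOf arr) 1).foldl (stepB arr) 0) == 4 then "YES" else "NO" := rfl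

theorem colsOf_nonneg (arr : List String) : 0 ≤ colsOf arr := by
  simp [colsOf, PySem.Str.len_eq]

theorem vget (i : Int) (h0 : 0 ≤ i) (h4 : i < 4) :
    PySem.Str.pyGet? "vika" i = some (vch i) := by
  interval_cases i <;> decide

theorem vchMem (i : Int) (h0 : 0 ≤ i) (h4 : i < 4) : vch i ∈ vikaL := by
  interval_cases i <;> decide

theorem innerStep_eq (arr : List String) (i : Int) (d : PySem.Dict Char (PySem.Set Int)) :
    outerStep arr d i = arr.foldl (innerStep i) d :=
  PySem.List.foldl_pyRange_zero_pyGetD arr "" (innerStep i) d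

theorem inner_keys (l : List String) (i : Int) (d : PySem.Dict Char (PySem.Set Int)) :
    (l.foldl (innerStep i) d).keys = d.keys := by
  induction l generalizing d with
  | nil => rfl
  | cons row l ih =>
    rw [List.foldl_cons, ih]
    cases h : PySem.List.pyGet? row.toList i with
    | none => simp [innerStep, h]
    | some ch =>
      by_cases hc : d.contains ch = true
      · simp [innerStep, h, hc, PySem.Dict.modify, PySem.Dict.keys_insert_of_contains]
      · simp [innerStep, h, hc]

theorem inner_getD (l : List String) (i : Int) (d : PySem.Dict Char (PySem.Set Int))
    (ch : Char) (hch : ch ∈ d.keys) :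
    (l.foldl (innerStep i) d).getD ch PySem.Set.empty =
      if hasCol l i ch then PySem.Set.add (d.getD ch PySem.Set.empty) i
      else d.getD ch PySem.Set.empty := by
  induction l generalizing d with
  | nil => simp [hasCol]
  | cons row l ih =>
    rw [List.foldl_cons]
    cases h : PySem.List.pyGet? row.toList i with
    | none =>
      have hstep : innerStep i d row = d := by simp [innerStep, h]
      rw [hstep, ih d hch]
      simp [hasCol, h]
    | some ch' =>
      by_cases he : ch' = ch
      · subst he
        have hc : d.contains ch' = true := (PySem.Dict.contains_iff_mem_keys _ _).mpr hch
        have hstep : innerStep i d row =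
            d.modify ch' PySem.Set.empty (fun s => PySem.Set.add s i) := by
          simp [innerStep, h, hc]
        have hkeys : (d.modify ch' PySem.Set.empty (fun s => PySem.Set.add s i)).keys = d.keys := by
          simp [PySem.Dict.modify, PySem.Dict.keys_insert_of_contains, hc]
        rw [hstep, ih _ (hkeys ▸ hch),
          PySem.Dict.getD_modify_self d ch' PySem.Set.empty (fun s => PySem.Set.add s i)]
        simp only [hasCol, List.any_cons]
        simp [h]
      · have hkg : (innerStep i d row).getD ch PySem.Set.empty = d.getD ch PySem.Set.empty ∧
            (innerStep i d row).keys = d.keys := by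
          by_cases hc : d.contains ch' = true
          · constructor
            · simp [innerStep, h, hc, PySem.Dict.getD_modify, Ne.symm he]
            · simp [innerStep, h, hc, PySem.Dict.modify, PySem.Dict.keys_insert_of_contains]
          · simp [innerStep, h, hc]
        rw [ih _ (hkg.2 ▸ hch), hkg.1]
        simp only [hasCol, List.any_cons]
        simp [h, he]

theorem outer_char (arr : List String) (k : Nat) (d : PySem.Dict Char (PySem.Set Int))
    (hk : d.keys = vikaL) :
    ((PySem.List.pyRange 0 (k : Int) 1).foldl (outerStep arr) d).keys = vikaL ∧
    ∀ ch ∈ vikaL, ∀ x : Int,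
      (x ∈ ((PySem.List.pyRange 0 (k : Int) 1).foldl (outerStep arr) d).getD ch PySem.Set.empty ↔
        x ∈ d.getD ch PySem.Set.empty ∨ (0 ≤ x ∧ x < (k : Int) ∧ hasCol arr x ch = true)) := by
  induction k generalizing d with
  | zero =>
    rw [PySem.List.pyRange_one_eq_nil (by norm_num)]
    refine ⟨hk, fun ch hch x => ?_⟩
    simp only [List.foldl_nil]
    constructor
    · exact fun hx => Or.inl hx
    · rintro (hx | ⟨_, hlt, _⟩)
      · exact hx
      · omega
  | succ k ih =>
    have hcast : ((k + 1 : Nat) : Int) = (k : Int) + 1 := by push_cast; ring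
    rw [hcast, PySem.List.pyRange_one_succ_right (by positivity), List.foldl_append]
    obtain ⟨ihk, ihm⟩ := ih d hk
    set dk := (PySem.List.pyRange 0 (k : Int) 1).foldl (outerStep arr) d with hdk
    simp only [List.foldl_cons, List.foldl_nil]
    rw [innerStep_eq]
    constructor
    · rw [inner_keys]
      exact ihk
    · intro ch hch x
      have hchk : ch ∈ dk.keys := by rw [ihk]; exact hch
      rw [inner_getD arr (k : Int) dk ch hchk]
      have hmem := ihm ch hch x
      by_cases hc : hasCol arr (k : Int) ch = true
      · rw [if_pos hc]
        rw [PySem.Set.mem_add]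
        constructor
        · rintro (hx | rfl)
          · rcases hmem.mp hx with h1 | ⟨h2, h3, h4⟩
            · exact Or.inl h1
            · exact Or.inr ⟨h2, by omega, h4⟩
          · exact Or.inr ⟨by positivity, by omega, hc⟩
        · rintro (hx | ⟨h2, h3, h4⟩)
          · exact Or.inl (hmem.mpr (Or.inl hx))
          · by_cases hxk : x = (k : Int)
            · exact Or.inr hxk
            · exact Or.inl (hmem.mpr (Or.inr ⟨h2, by omega, h4⟩))
      · rw [if_neg hc]
        rw [hmem]
        constructor
        · rintro (hx | ⟨h2, h3, h4⟩)
          · exact Or.inl hx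
          · exact Or.inr ⟨h2, by omega, h4⟩
        · rintro (hx | ⟨h2, h3, h4⟩)
          · exact Or.inl hx
          · have hxk : x ≠ (k : Int) := by
              rintro rfl
              exact hc h4
            exact Or.inr ⟨h2, by omega, h4⟩

theorem mv_char (arr : List String) :
    (mvOf arr).keys = vikaL ∧
    ∀ ch ∈ vikaL, ∀ x : Int,
      (x ∈ (mvOf arr).getD ch PySem.Set.empty ↔
        0 ≤ x ∧ x < colsOf arr ∧ hasCol arr x ch = true) := by
  have hc0 : 0 ≤ colsOf arr := colsOf_nonneg arr
  have hcast : ((colsOf arr).toNat : Int) = colsOf arr := Int.toNat_of_nonneg hc0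
  have hk0 : mv0D.keys = vikaL := by decide
  obtain ⟨h1, h2⟩ := outer_char arr (colsOf arr).toNat mv0D hk0
  rw [hcast] at h1 h2
  refine ⟨h1, fun ch hch x => ?_⟩
  have hempty : mv0D.getD ch PySem.Set.empty = PySem.Set.empty := by
    fin_cases hch <;> decide
  have := h2 ch hch x
  rw [hempty] at this
  simpa [PySem.Set.empty] using this

theorem gg_of_ge (arr : List String) (n : Nat) (i c : Int) (h : 4 ≤ i) : gg arr n i c = true := by
  cases n <;> simp [gg, h]

theorem mv_contains (arr : List String) (i c : Int) (hi : 0 ≤ i) (hi4 : i < 4)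
    (hc : 0 ≤ c) (hcc : c < colsOf arr) :
    PySem.Set.contains ((mvOf arr).getD (vch i) PySem.Set.empty) c = hasCol arr c (vch i) := by
  have hm := (mv_char arr).2 (vch i) (vchMem i hi hi4) c
  cases hcol : hasCol arr c (vch i) with
  | true =>
    have h' : c ∈ (mvOf arr).getD (vch i) [] := hm.mpr ⟨hc, hcc, hcol⟩
    simp [PySem.Set.contains, h']
  | false =>
    have : c ∉ (mvOf arr).getD (vch i) PySem.Set.empty := by
      intro hx
      have := (hm.mp hx).2.2
      rw [hcol] at this
      exact Bool.false_ne_true this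
    have h' : c ∉ (mvOf arr).getD (vch i) [] := this
    simp [PySem.Set.contains, h']

theorem dfs_gg (arr : List String) :
    ∀ (fuel : Nat) (i c p : Int) (cache : PySem.Dict (Int × Int × Int) Bool),
      GoodC arr (colsOf arr) cache → 0 ≤ i → 0 ≤ c → p < c →
      (colsOf arr - c).toNat ≤ fuel →
      (dfsA (mvOf arr) (colsOf arr) fuel i c p cache).1 = gg arr (colsOf arr - c).toNat i c ∧
      GoodC arr (colsOf arr) (dfsA (mvOf arr) (colsOf arr) fuel i c p cache).2 := by
  intro fuel
  induction fuel with
  | zero =>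
    intro i c p cache hg hi hc hpc hfuel
    rw [dfsA]
    cases hhit : cache.get? (i, c, p) with
    | some b =>
      exact ⟨(hg i c p b hhit).2.2, hg⟩
    | none =>
      by_cases h4 : i ≥ 4
      · simp only [if_pos h4]
        exact ⟨(gg_of_ge arr _ i c h4).symm, hg⟩
      · have hcc : colsOf arr ≤ c := by omega
        have h0 : (colsOf arr - c).toNat = 0 := by omega
        simp only [if_neg h4, if_pos hcc, h0]
        refine ⟨?_, hg⟩
        simp [gg, h4]
  | succ n ih =>
    intro i c p cache hg hi hc hpc hfuel
    rw [dfsA]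
    cases hhit : cache.get? (i, c, p) with
    | some b =>
      exact ⟨(hg i c p b hhit).2.2, hg⟩
    | none =>
      by_cases h4 : i ≥ 4
      · simp only [if_pos h4]
        exact ⟨(gg_of_ge arr _ i c h4).symm, hg⟩
      · by_cases hcc : colsOf arr ≤ c
        · have h0 : (colsOf arr - c).toNat = 0 := by omega
          simp only [if_neg h4, if_pos hcc, h0]
          refine ⟨?_, hg⟩
          simp [gg, h4]
        · simp only [if_neg h4, if_neg hcc]
          have hclt : c < colsOf arr := by omega
          have hm : (colsOf arr - c).toNat = (colsOf arr - (c + 1)).toNat + 1 := by omega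
          have h1 := ih i (c + 1) p cache hg hi (by omega) (by omega) (by omega)
          have htest : (PySem.Set.contains ((mvOf arr).getD ((PySem.Str.pyGet? "vika" i).getD ' ')
              PySem.Set.empty) c && decide (p < c)) = hasCol arr c (vch i) := by
            have : (PySem.Str.pyGet? "vika" i).getD ' ' = vch i := rfl
            rw [this, mv_contains arr i c hi (by omega) hc hclt]
            simp [hpc]
          rw [htest]
          cases hcol : hasCol arr c (vch i) with
          | true =>
            simp only [if_true]
            have h2 := ih (i + 1) (c + 1) c (dfsA (mvOf arr) (colsOf arr) n i (c + 1) p cache).2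
              h1.2 (by omega) (by omega) (by omega) (by omega)
            have hval : (dfsA (mvOf arr) (colsOf arr) n (i + 1) (c + 1) c
                (dfsA (mvOf arr) (colsOf arr) n i (c + 1) p cache).2).1 =
                gg arr (colsOf arr - c).toNat i c := by
              rw [h2.1, hm]
              simp [gg, h4, hcol]
            refine ⟨hval, ?_⟩
            intro i' c' p' b' hb'
            rw [PySem.Dict.get?_insert] at hb'
            by_cases hk : (i', c', p') = (i, c, p)
            · rw [if_pos hk] at hb'
              obtain ⟨rfl, rfl, rfl⟩ := Prod.mk.injEq .. ▸ (by
                have := hk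
                exact ⟨congrArg (·.1) this, congrArg (·.2.1) this, congrArg (·.2.2) this⟩ :
                  i' = i ∧ c' = c ∧ p' = p)
              exact ⟨hc, hpc, by rw [← hval]; exact (Option.some.injEq .. ▸ hb').symm⟩
            · rw [if_neg hk] at hb'
              exact h2.2 i' c' p' b' hb'
          | false =>
            simp only [Bool.false_eq_true, if_neg (by exact fun h => h)]
            have hval : (dfsA (mvOf arr) (colsOf arr) n i (c + 1) p cache).1 =
                gg arr (colsOf arr - c).toNat i c := by
              rw [h1.1, hm]
              simp [gg, h4, hcol]
            refine ⟨hval, ?_⟩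
            intro i' c' p' b' hb'
            rw [PySem.Dict.get?_insert] at hb'
            by_cases hk : (i', c', p') = (i, c, p)
            · rw [if_pos hk] at hb'
              obtain ⟨rfl, rfl, rfl⟩ := (by
                exact ⟨congrArg (·.1) hk, congrArg (·.2.1) hk, congrArg (·.2.2) hk⟩ :
                  i' = i ∧ c' = c ∧ p' = p)
              exact ⟨hc, hpc, by rw [← hval]; exact (Option.some.injEq .. ▸ hb').symm⟩
            · rw [if_neg hk] at hb'
              exact h1.2 i' c' p' b' hb'

theorem stepB_four (arr : List String) (l : List Int) : l.foldl (stepB arr) 4 = 4 := by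
  induction l with
  | nil => rfl
  | cons c l ih => simpa [stepB] using ih

theorem gg_fold (arr : List String) (cols : Int) :
    ∀ (n : Nat) (idx c : Int), 0 ≤ idx → idx ≤ 4 → 0 ≤ c → (cols - c).toNat = n →
      gg arr n idx c = ((PySem.List.pyRange c cols 1).foldl (stepB arr) idx == 4) := by
  intro n
  induction n with
  | zero =>
    intro idx c h0 h4 hc hn
    have hcc : cols ≤ c := by omega
    rw [PySem.List.pyRange_one_eq_nil hcc]
    simp only [List.foldl_nil, gg]
    by_cases he : idx = 4
    · subst he; simp
    · have : ¬ idx ≥ 4 := by omega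
      simp [this, he]
  | succ n ih =>
    intro idx c h0 h4 hc hn
    have hclt : c < cols := by omega
    rw [PySem.List.pyRange_one_cons hclt, List.foldl_cons]
    by_cases hge : idx ≥ 4
    · have he : idx = 4 := by omega
      subst he
      have hstep : stepB arr 4 c = 4 := by simp [stepB]
      rw [hstep, stepB_four]
      simp [gg_of_ge arr _ _ _ (by omega)]
    · have hstep : stepB arr idx c = if hasCol arr c (vch idx) then idx + 1 else idx := by
        have hv : PySem.Str.pyGet? "vika" idx = some (vch idx) := vget idx h0 (by omega)
        simp only [stepB, hv, decide_eq_true (show idx < 4 by omega), Bool.true_and]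
        rfl
      rw [hstep]
      have hgg : gg arr (n + 1) idx c =
          if hasCol arr c (vch idx) then gg arr n (idx + 1) (c + 1) else gg arr n idx (c + 1) := by
        simp [gg, hge]
      rw [hgg]
      cases hcol : hasCol arr c (vch idx) with
      | true =>
        simp only [if_true]
        exact ih (idx + 1) (c + 1) (by omega) (by omega) (by omega) (by omega)
      | false =>
        simp only [Bool.false_eq_true, if_neg (fun h => h)]
        exact ih idx (c + 1) h0 h4 (by omega) (by omega)

theorem fold_bound (arr : List String) (kk : Int) (h0 : 0 ≤ kk) (h4 : kk < 4)
    (hmiss : ∀ c ∈ PySem.List.pyRange 0 (colsOf arr) 1, hasCol arr c (vch kk) = false) :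
    ∀ (l : List Int), (∀ c ∈ l, c ∈ PySem.List.pyRange 0 (colsOf arr) 1) →
    ∀ idx : Int, 0 ≤ idx → idx ≤ kk → l.foldl (stepB arr) idx ≤ kk := by
  intro l
  induction l with
  | nil => intro _ idx _ hle; simpa using hle
  | cons c l ih =>
    intro hmem idx h0 hle
    rw [List.foldl_cons]
    have hcr := hmem c (List.mem_cons_self ..)
    refine ih (fun c' hc' => hmem c' (List.mem_cons_of_mem _ hc')) _ ?_ ?_
    · simp only [stepB]
      split <;> omega
    · by_cases he : idx = kk
      · subst he
        have hv : PySem.Str.pyGet? "vika" idx = some (vch idx) := vget idx h0 (by omega)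
        have hm' : (arr.any fun row => PySem.Str.pyGet? row c == some (vch idx)) = false :=
          hmiss c hcr
        have : stepB arr idx c = idx := by
          simp only [stepB, hv]
          rw [hm']
          simp
        omega
      · have : stepB arr idx c ≤ idx + 1 := by
          simp only [stepB]; split <;> omega
        omega

theorem missing_letter (arr : List String)
    (h : (mvOf arr).items.any (fun p => PySem.Set.len p.2 == 0) = true) :
    ∃ kk : Int, 0 ≤ kk ∧ kk < 4 ∧
      ∀ c ∈ PySem.List.pyRange 0 (colsOf arr) 1, hasCol arr c (vch kk) = false := by
  obtain ⟨hkeys, hmem⟩ := mv_char arr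
  have hnodup : (mvOf arr).keys.Nodup := by rw [hkeys]; decide
  rw [PySem.Dict.items_eq_map_keys (mvOf arr) hnodup PySem.Set.empty, List.any_map] at h
  rw [hkeys] at h
  rw [List.any_eq_true] at h
  obtain ⟨ch, hch, hlen⟩ := h
  have hvk : ∃ kk : Int, 0 ≤ kk ∧ kk < 4 ∧ vch kk = ch := by
    fin_cases hch
    · exact ⟨0, by norm_num, by decide⟩
    · exact ⟨1, by norm_num, by decide⟩
    · exact ⟨2, by norm_num, by decide⟩
    · exact ⟨3, by norm_num, by decide⟩
  obtain ⟨kk, hk0, hk4, rfl⟩ := hvk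
  refine ⟨kk, hk0, hk4, fun c hcr => ?_⟩
  rw [PySem.List.mem_pyRange_one] at hcr
  have hnil : (mvOf arr).getD (vch kk) PySem.Set.empty = [] := by
    have := hlen
    simp only [Function.comp, PySem.Set.len] at this
    rcases hmv : (mvOf arr).getD (vch kk) PySem.Set.empty with _ | ⟨y, ys⟩
    · rfl
    · exfalso
      rw [hmv] at this
      simp at this
      omega
  cases hcol : hasCol arr c (vch kk) with
  | true =>
    exfalso
    have : c ∈ (mvOf arr).getD (vch kk) PySem.Set.empty :=
      (hmem (vch kk) hch c).mpr ⟨hcr.1, hcr.2, hcol⟩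
    rw [hnil] at this
    simp at this
  | false => rfl

theorem ports_eq (arr : List String) : checkVika arr = checkVika_alt arr := by
  rw [checkVika_eq, alt_eq]
  by_cases hAny : (mvOf arr).items.any (fun p => PySem.Set.len p.2 == 0) = true
  · obtain ⟨kk, hk0, hk4, hmiss⟩ := missing_letter arr hAny
    have hb := fold_bound arr kk hk0 hk4 hmiss (PySem.List.pyRange 0 (colsOf arr) 1)
      (fun c hc => hc) 0 le_rfl hk0
    have hne : ((PySem.List.pyRange 0 (colsOf arr) 1).foldl (stepB arr) 0 == 4) = false := by
      simp only [beq_eq_false_iff_ne, ne_eq]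
      omega
    rw [if_pos hAny, hne]
    rfl
  · have hgood : GoodC arr (colsOf arr) PySem.Dict.empty := by
      intro i c p b hb
      simp [PySem.Dict.get?_empty] at hb
    have hd := (dfs_gg arr (colsOf arr).toNat 0 0 (-1) PySem.Dict.empty hgood le_rfl le_rfl
      (by norm_num) (by omega)).1
    have hf := gg_fold arr (colsOf arr) (colsOf arr - 0).toNat 0 0 le_rfl (by norm_num) le_rfl rfl
    rw [hf] at hd
    rw [if_neg hAny, hd]

-- ===== VERDICT (by name: the statement is the Claim_ definition above) =====
theorem checkVika_spec : Claim_equal_checkVika := by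
  intro arr _ _
  exact ports_eq arr
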